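-- pv_equiv track=rewrite | github.com/sorenlind/lemmy | lemma/lemmatizer.py | _longest_matching_rule
-- ===== SOURCE A (Python) =====
-- def _longest_matching_rule(rules, word_class, full_form):
--     """Find the rule with the longest full form suffix matching specified full form and class."""
--     best = ("", [""])
--     if word_class not in rules:
--         return best
--
--     start_index = 0
--     word_class_rules = rules[word_class]
--     while start_index <= len(full_form):
--         temp_suffix = full_form[start_index:]
--         if temp_suffix in word_class_rules:
--             best = temp_suffix, word_class_rules[temp_suffix]
--             break
--         start_index += 1
--     return best
-- ===== SOURCE B (Python) =====
-- def _longest_matching_rule(rules, word_class, full_form):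
--     """Find the rule with the longest full form suffix matching specified full form and class."""
--     if word_class not in rules:
--         return ("", [""])
--     best = None
--     for key, value in rules[word_class].items():
--         if full_form.endswith(key) and (best is None or len(key) > len(best[0])):
--             best = (key, value)
--     return best if best is not None else ("", [""])
-- ===== Notes on version B (the rewrite author's own statement) =====
-- stated objective: idiomatic
-- what changed: Instead of scanning suffix start positions of full_form and probing the dict at each, B makes one pass over the word-class rule items, keeping the matching key of greatest length (endswith test), with a None sentinel so an empty-string key still yields its own value.
import Mathlib
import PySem

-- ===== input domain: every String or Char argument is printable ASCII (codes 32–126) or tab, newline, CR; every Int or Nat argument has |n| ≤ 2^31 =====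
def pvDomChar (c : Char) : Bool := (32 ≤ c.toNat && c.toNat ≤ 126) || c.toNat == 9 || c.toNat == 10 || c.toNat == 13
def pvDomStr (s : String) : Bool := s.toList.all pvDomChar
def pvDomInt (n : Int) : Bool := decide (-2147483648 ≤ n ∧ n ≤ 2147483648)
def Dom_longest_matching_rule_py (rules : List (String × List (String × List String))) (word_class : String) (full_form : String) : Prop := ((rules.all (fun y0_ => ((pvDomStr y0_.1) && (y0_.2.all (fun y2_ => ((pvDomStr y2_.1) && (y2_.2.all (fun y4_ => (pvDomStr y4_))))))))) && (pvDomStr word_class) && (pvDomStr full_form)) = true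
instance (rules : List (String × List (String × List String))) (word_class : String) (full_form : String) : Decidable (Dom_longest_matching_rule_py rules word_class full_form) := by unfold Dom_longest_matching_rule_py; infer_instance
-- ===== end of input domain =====

-- B replaces A's scan over suffix start positions (probing the rule dict at each) by one
-- pass over the rule items keeping the longest key that full_form ends with (idiomatic, same cost class).


-- ===== PORT A =====
-- the while loop: start_index counts up, full_form[start_index:] is probed in the rule dict
-- (first-match association-list lookup), break on the first hit
def pyAGo (wcr : List (String × List String)) (ff : String) (i : Nat) : String × List String :=
  if h : (i : Int) ≤ PySem.Str.len ff then
    match List.lookup (PySem.Str.slice ff (some (i : Int)) none) wcr with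
    | some v => (PySem.Str.slice ff (some (i : Int)) none, v)
    | none => pyAGo wcr ff (i + 1)
  else ("", [""])
termination_by ff.length + 1 - i
decreasing_by
  simp [PySem.Str.len] at h; omega

def longest_matching_rule_py (rules : List (String × List (String × List String))) (word_class : String) (full_form : String) : String × List String :=
  let best : String × List String := ("", [""])
  match List.lookup word_class rules with
  | none => best
  | some word_class_rules => pyAGo word_class_rules full_form 0

-- ===== PORT B =====
-- one item of B's loop: keep kv if full_form ends with its key and it is strictly longer than the best so far
def bStep (ff : String) (best : Option (String × List String)) (kv : String × List String) : Option (String × List String) :=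
  if PySem.Str.endswith ff kv.1 &&
      (match best with
       | none => true
       | some b => decide (PySem.Str.len b.1 < PySem.Str.len kv.1)) then
    some kv
  else best

def longest_matching_rule_py_alt (rules : List (String × List (String × List String))) (word_class : String) (full_form : String) : String × List String :=
  match List.lookup word_class rules with
  | none => ("", [""])
  | some word_class_rules => (word_class_rules.foldl (bStep full_form) none).getD ("", [""])

-- ===== PRECONDITION & SPEC =====
def Spec_longest_matching_rule_py (rules : List (String × List (String × List String))) (word_class : String) (full_form : String) (out : String × List String) : Prop := out = longest_matching_rule_py_alt rules word_class full_form
instance (rules : List (String × List (String × List String))) (word_class : String) (full_form : String) (out : String × List String) : Decidable (Spec_longest_matching_rule_py rules word_class full_form out) := by unfold Spec_longest_matching_rule_py; infer_instance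

-- ===== CLAIM (what is proved, stated in full; the proofs are below) =====
def Claim_equal_longest_matching_rule_py : Prop := ∀ (rules : List (String × List (String × List String))) (word_class : String) (full_form : String), Dom_longest_matching_rule_py rules word_class full_form → Spec_longest_matching_rule_py rules word_class full_form (longest_matching_rule_py rules word_class full_form)

-- ===== LEMMAS AND PROOFS =====

-- the suffix of full_form starting at j, as A's loop builds it
def sfx (ff : String) (j : Nat) : String := PySem.Str.slice ff (some (j : Int)) none

theorem sfx_toList (ff : String) (j : Nat) : (sfx ff j).toList = ff.toList.drop j := by
  simp [sfx, PySem.Str.toList_slice, PySem.Chars.slice_eq_listSlice, PySem.List.slice_from_natCast]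

theorem endswith_iff_suffix (ff k : String) :
    PySem.Str.endswith ff k = true ↔ k.toList <:+ ff.toList := by
  rw [PySem.Str.endswith_eq, PySem.Chars.endswith_iff]

theorem suffix_eq_sfx {ff k : String} (h : k.toList <:+ ff.toList) :
    k = sfx ff (ff.toList.length - k.toList.length) := by
  rw [← String.toList_inj, sfx_toList]
  exact List.suffix_iff_eq_drop.mp h

theorem mem_lookup_isSome {α : Type} {l : List (String × α)} {k : String} {v : α}
    (h : (k, v) ∈ l) : (List.lookup k l).isSome := by
  induction l with
  | nil => cases h
  | cons hd t ih =>
    obtain ⟨a, b⟩ := hd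
    rcases List.mem_cons.mp h with h | h
    · cases h
      simp [List.lookup]
    · cases hke : (k == a) with
      | true => simp [List.lookup, hke]
      | false =>
        rw [List.lookup, hke]
        exact ih h

theorem lookup_split {α : Type} {l : List (String × α)} {k : String} {v : α}
    (h : List.lookup k l = some v) :
    ∃ l1 l2, l = l1 ++ (k, v) :: l2 ∧ ∀ kv ∈ l1, kv.1 ≠ k := by
  induction l with
  | nil => simp [List.lookup] at h
  | cons hd t ih =>
    obtain ⟨a, b⟩ := hd
    cases hke : (k == a) with
    | true =>
      rw [List.lookup, hke] at h
      have hk : k = a := by simpa using hke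
      have hv : b = v := by simpa using h
      refine ⟨[], t, ?_, by simp⟩
      simp [hk, hv]
    | false =>
      rw [List.lookup, hke] at h
      obtain ⟨l1, l2, heq, hne⟩ := ih h
      refine ⟨(a, b) :: l1, l2, by simp [heq], ?_⟩
      intro x hx
      rcases List.mem_cons.mp hx with hx | hx
      · subst hx
        intro hc
        have hka : k = a := hc.symm
        rw [hka] at hke
        simp at hke
      · exact hne x hx

theorem fold_mem (ff : String) (l : List (String × List String)) :
    ∀ acc, l.foldl (bStep ff) acc = acc ∨
      ∃ kv ∈ l, l.foldl (bStep ff) acc = some kv ∧ PySem.Str.endswith ff kv.1 = true := by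
  induction l with
  | nil => intro acc; left; rfl
  | cons kv t ih =>
    intro acc
    rw [List.foldl_cons]
    by_cases hc : bStep ff acc kv = acc
    · rw [hc]
      rcases ih acc with h | ⟨kv', hm, he, hw⟩
      · left; exact h
      · right; exact ⟨kv', List.mem_cons_of_mem _ hm, he, hw⟩
    · have hstep : bStep ff acc kv = some kv ∧ PySem.Str.endswith ff kv.1 = true := by
        unfold bStep at hc ⊢
        split_ifs at hc ⊢ with hcond
        · simp only [Bool.and_eq_true] at hcond
          exact ⟨rfl, hcond.1⟩
        · exact absurd rfl hc
      rcases ih (bStep ff acc kv) with h | ⟨kv', hm, he, hw⟩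
      · rw [h, hstep.1]
        right; exact ⟨kv, List.mem_cons_self, rfl, hstep.2⟩
      · right; exact ⟨kv', List.mem_cons_of_mem _ hm, he, hw⟩

theorem fold_keep (ff : String) (b : String × List String) (l : List (String × List String))
    (h : ∀ kv ∈ l, PySem.Str.endswith ff kv.1 = true →
      kv.1.toList.length ≤ b.1.toList.length) :
    l.foldl (bStep ff) (some b) = some b := by
  induction l with
  | nil => rfl
  | cons kv t ih =>
    rw [List.foldl_cons]
    have hstep : bStep ff (some b) kv = some b := by
      unfold bStep
      split_ifs with hcond
      · simp only [Bool.and_eq_true, decide_eq_true_eq, PySem.Str.len] at hcond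
        have := h kv List.mem_cons_self hcond.1
        have h2 := hcond.2
        omega
      · rfl
    rw [hstep]
    exact ih (fun kv hm hw => h kv (List.mem_cons_of_mem _ hm) hw)

theorem aGo_none (wcr : List (String × List String)) (ff : String) :
    ∀ i, (∀ j, i ≤ j → j ≤ ff.length → List.lookup (sfx ff j) wcr = none) →
      pyAGo wcr ff i = ("", [""]) := by
  intro i
  induction i using pyAGo.induct (wcr := wcr) (ff := ff) with
  | case1 x hle v hlk =>
    intro h
    have hx : x ≤ ff.length := by
      simp [PySem.Str.len] at hle
      exact_mod_cast hle
    have hnone := h x le_rfl hx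
    unfold sfx at hnone
    rw [hnone] at hlk
    cases hlk
  | case2 x hle hlk ih =>
    intro h
    rw [pyAGo, dif_pos hle, hlk]
    exact ih (fun j hj hjn => h j (by omega) hjn)
  | case3 x hle =>
    intro h
    rw [pyAGo, dif_neg hle]

theorem aGo_found (wcr : List (String × List String)) (ff : String) (j₀ : Nat) (v₀ : List String)
    (hj : j₀ ≤ ff.length)
    (hv₀ : List.lookup (sfx ff j₀) wcr = some v₀)
    (hmin : ∀ j < j₀, List.lookup (sfx ff j) wcr = none) :
    ∀ i, i ≤ j₀ → pyAGo wcr ff i = (sfx ff j₀, v₀) := by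
  intro i
  induction i using pyAGo.induct (wcr := wcr) (ff := ff) with
  | case1 x hle v hlk =>
    intro hij
    have hxj : x = j₀ := by
      by_contra hne
      have hlt : x < j₀ := lt_of_le_of_ne hij hne
      have := hmin x hlt
      unfold sfx at this
      rw [this] at hlk
      cases hlk
    subst hxj
    rw [pyAGo, dif_pos hle, hlk]
    unfold sfx at hv₀
    rw [hv₀] at hlk
    injection hlk with hv
    rw [hv]
    rfl
  | case2 x hle hlk ih =>
    intro hij
    have hxj : x ≠ j₀ := by
      intro he; subst he
      unfold sfx at hv₀
      rw [hv₀] at hlk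
      cases hlk
    rw [pyAGo, dif_pos hle, hlk]
    exact ih (by omega)
  | case3 x hle =>
    intro hij
    exfalso
    apply hle
    simp [PySem.Str.len]
    exact_mod_cast le_trans hij hj

-- the crux: A's suffix scan and B's fold agree for any rule list
theorem key_lemma (wcr : List (String × List String)) (ff : String) :
    pyAGo wcr ff 0 = (wcr.foldl (bStep ff) none).getD ("", [""]) := by
  have hnl : ff.toList.length = ff.length := by simp
  set n := ff.toList.length with hn
  by_cases hex : ∃ j, j ≤ n ∧ (List.lookup (sfx ff j) wcr).isSome
  · classical
    have hexP : ∃ j, j ≤ n ∧ (List.lookup (sfx ff j) wcr).isSome = true := hex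
    obtain ⟨j₀, ⟨hj₀n, hsome⟩, hminP⟩ :
        ∃ j₀, (j₀ ≤ n ∧ (List.lookup (sfx ff j₀) wcr).isSome = true) ∧
          ∀ j < j₀, ¬ (j ≤ n ∧ (List.lookup (sfx ff j) wcr).isSome = true) :=
      ⟨Nat.find hexP, Nat.find_spec hexP, fun j hj => Nat.find_min hexP hj⟩
    obtain ⟨v₀, hv₀⟩ := Option.isSome_iff_exists.mp hsome
    have hmin : ∀ j < j₀, List.lookup (sfx ff j) wcr = none := by
      intro j hj
      rcases Option.eq_none_or_eq_some (List.lookup (sfx ff j) wcr) with h | ⟨v, h⟩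
      · exact h
      · exact absurd ⟨by omega, by simp [h]⟩ (hminP j hj)
    have hbound : ∀ kv ∈ wcr, PySem.Str.endswith ff kv.1 = true →
        kv.1.toList.length ≤ n - j₀ := by
      intro kv hm hw
      have hsuf : kv.1.toList <:+ ff.toList := (endswith_iff_suffix ff kv.1).mp hw
      have hlen : kv.1.toList.length ≤ n := hsuf.length_le
      have heq : kv.1 = sfx ff (n - kv.1.toList.length) := suffix_eq_sfx hsuf
      have hsome' : (List.lookup (sfx ff (n - kv.1.toList.length)) wcr).isSome := by
        rw [← heq]; exact mem_lookup_isSome hm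
      have : ¬ (n - kv.1.toList.length < j₀) := fun hlt =>
        hminP _ hlt ⟨by omega, hsome'⟩
      omega
    have heqcase : ∀ kv : String × List String, PySem.Str.endswith ff kv.1 = true →
        kv.1.toList.length = n - j₀ → kv.1 = sfx ff j₀ := by
      intro kv hw hlen
      have hsuf : kv.1.toList <:+ ff.toList := (endswith_iff_suffix ff kv.1).mp hw
      have h1 := suffix_eq_sfx hsuf
      rw [hlen] at h1
      have h2 : n - (n - j₀) = j₀ := by omega
      rwa [← hn, h2] at h1
    have hsfxlen : (sfx ff j₀).toList.length = n - j₀ := by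
      rw [sfx_toList]
      simp [hn]
    have hsfxsuf : PySem.Str.endswith ff (sfx ff j₀) = true := by
      rw [endswith_iff_suffix, sfx_toList]
      exact List.drop_suffix _ _
    have hA : pyAGo wcr ff 0 = (sfx ff j₀, v₀) :=
      aGo_found wcr ff j₀ v₀ (by omega) hv₀ hmin 0 (Nat.zero_le _)
    obtain ⟨l1, l2, hsplit, hne⟩ := lookup_split hv₀
    have hfold : wcr.foldl (bStep ff) none = some (sfx ff j₀, v₀) := by
      rw [hsplit, List.foldl_append, List.foldl_cons]
      have hacc1 := fold_mem ff l1 none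
      have hstep : bStep ff (l1.foldl (bStep ff) none) (sfx ff j₀, v₀) =
          some (sfx ff j₀, v₀) := by
        rcases hacc1 with h | ⟨kv, hm, he, hw⟩
        · rw [h]
          unfold bStep
          simp only [hsfxsuf, Bool.true_and]
          exact if_pos trivial
        · rw [he]
          have hmw : kv ∈ wcr := by rw [hsplit]; exact List.mem_append_left _ hm
          have hle : kv.1.toList.length ≤ n - j₀ := hbound kv hmw hw
          have hlt : kv.1.toList.length < n - j₀ := by
            rcases lt_or_eq_of_le hle with h' | h'
            · exact h'
            · exact absurd (heqcase kv hw h') (hne kv hm)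
          unfold bStep
          rw [if_pos]
          simp only [hsfxsuf, Bool.true_and, decide_eq_true_eq, PySem.Str.len]
          rw [hsfxlen]
          exact_mod_cast hlt
      rw [hstep]
      refine fold_keep ff (sfx ff j₀, v₀) l2 ?_
      intro kv hm hw
      have hmw : kv ∈ wcr := by
        rw [hsplit]; exact List.mem_append_right _ (List.mem_cons_of_mem _ hm)
      have := hbound kv hmw hw
      rw [hsfxlen]
      omega
    rw [hA, hfold]
    rfl
  · push_neg at hex
    have hnone : ∀ j, j ≤ n → List.lookup (sfx ff j) wcr = none := by
      intro j hj
      rcases Option.eq_none_or_eq_some (List.lookup (sfx ff j) wcr) with h | ⟨v, h⟩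
      · exact h
      · exact absurd (by simp [h]) (hex j hj)
    have hA : pyAGo wcr ff 0 = ("", [""]) :=
      aGo_none wcr ff 0 (fun j _ hjn => hnone j (by omega))
    have hB : wcr.foldl (bStep ff) none = none := by
      rcases fold_mem ff wcr none with h | ⟨kv, hm, he, hw⟩
      · exact h
      · exfalso
        have hsuf : kv.1.toList <:+ ff.toList := (endswith_iff_suffix ff kv.1).mp hw
        have heq : kv.1 = sfx ff (n - kv.1.toList.length) := suffix_eq_sfx hsuf
        have : (List.lookup (sfx ff (n - kv.1.toList.length)) wcr).isSome := by
          rw [← heq]; exact mem_lookup_isSome hm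
        rw [hnone _ (by omega)] at this
        cases this
    rw [hA, hB]
    rfl

-- ===== VERDICT (by name: the statement is the Claim_ definition above) =====
theorem longest_matching_rule_py_spec : Claim_equal_longest_matching_rule_py := by
  intro rules word_class full_form _
  unfold Spec_longest_matching_rule_py longest_matching_rule_py longest_matching_rule_py_alt
  cases List.lookup word_class rules with
  | none => rfl
  | some wcr => exact key_lemma wcr full_form
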